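-- pv_equiv track=rewrite | github.com/imsoncod/Python-Algorithm | Programmers/선입 선출 스케줄링.py | solution
-- ===== SOURCE A (Python) =====
-- def solution(n, cores):
--     time = 0
--     while n>0:
--         for i in range(0,len(cores)):
--             if time%cores[i]==0:
--                 n-=1
--                 if n==0:
--                     return i+1
--         time+=1
-- ===== SOURCE B (Python) =====
-- def solution(n, cores):
--     if 0 < n <= len(cores):
--         # at time 0 every core fires, left to right: the n-th task lands on core n-1
--         return n
--     # number of fire events in times 0..t over all cores (t = -1 gives 0)
--     def done(t):
--         return sum(t // abs(c) + 1 for c in cores)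
--     # binary search for the first time lo with done(lo) >= n
--     lo, hi = 0, n * max(abs(c) for c in cores)
--     while lo < hi:
--         mid = (lo + hi) // 2
--         if done(mid) >= n:
--             hi = mid
--         else:
--             lo = mid + 1
--     # tasks left for time lo, resolved left to right among the cores firing at lo
--     r = n - done(lo - 1)
--     for i, c in enumerate(cores):
--         if lo % abs(c) == 0:
--             r -= 1
--             if r == 0:
--                 return i + 1
-- ===== Notes on version B (the rewrite author's own statement) =====
-- stated objective: alternative
-- what changed: Replaces A's time-step-by-time-step simulation with a time-0 shortcut plus, for n > len(cores), a closed-form cumulative fire count and a binary search on time for the first instant where n tasks have been assigned, then one left-to-right tie-break scan; Pre_ excludes n <= 0 (both fall through and return None, not an int), empty cores (A loops forever) and a zero core among the first min(n, len) positions (A raises ZeroDivisionError there).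
-- outside the precondition, e.g. on solution(0, [2]): A returns None, B returns None; on solution(0, []): A returns None, B raises ValueError; on solution(0, [0]): A returns None, B raises ZeroDivisionError
import Mathlib
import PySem

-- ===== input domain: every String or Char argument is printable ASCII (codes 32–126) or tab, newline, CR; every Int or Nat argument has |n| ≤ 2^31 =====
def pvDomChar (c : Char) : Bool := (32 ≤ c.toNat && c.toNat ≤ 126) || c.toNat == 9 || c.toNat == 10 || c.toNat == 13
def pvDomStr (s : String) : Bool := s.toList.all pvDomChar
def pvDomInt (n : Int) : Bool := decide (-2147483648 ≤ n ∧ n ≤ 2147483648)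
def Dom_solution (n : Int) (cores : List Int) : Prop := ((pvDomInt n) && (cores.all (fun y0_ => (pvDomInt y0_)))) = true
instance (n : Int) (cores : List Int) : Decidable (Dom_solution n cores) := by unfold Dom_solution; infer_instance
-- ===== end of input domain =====

-- B replaces A's time-step simulation by a time-0 shortcut plus a closed-form cumulative
-- fire count with a binary search on time and one tie-break scan.

-- ===== PORT A =====
-- inner 'for i in range(0,len(cores))' pass at a fixed time: structural recursion over cores
-- carrying the running index i; returns (some answer, _) on 'return i+1', else (none, n left)
def solutionScan (time : Int) (rest : List Int) (i : Int) (n : Int) : Option Int × Int :=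
  match rest with
  | [] => (none, n)
  | c :: cs =>
    if PySem.Int.mod time c == 0 then
      if n - 1 == 0 then (some (i + 1), n - 1)
      else solutionScan time cs (i + 1) (n - 1)
    else solutionScan time cs (i + 1) n

-- the 'while n>0' loop, made total with fuel (the loop's termination is data-dependent);
-- the fuel below is proved sufficient on Pre_, so this computes exactly Python's value there
def solutionLoop (cores : List Int) : Nat → Int → Int → Int
  | 0, _, _ => 0
  | fuel + 1, time, n =>
    if n > 0 then
      match solutionScan time cores 0 n with
      | (some ans, _) => ans
      | (none, n') => solutionLoop cores fuel (time + 1) n'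
    else 0

def solutionFuel (n : Int) (cores : List Int) : Nat :=
  n.toNat * (cores.foldl (fun acc c => max acc c.natAbs) 1) + 1

def solution (n : Int) (cores : List Int) : Int :=
  solutionLoop cores (solutionFuel n cores) 0 n

-- ===== PORT B =====
-- done(t) = number of fire events in times 0..t over all cores
def altDone (cores : List Int) (t : Int) : Int :=
  (cores.map (fun c => PySem.Int.floordiv t |c| + 1)).sum

-- binary search for the first time lo with done(lo) >= n
def altSearch (cores : List Int) (nn : Int) (lo hi : Int) : Int :=
  if h : lo < hi then
    let mid := PySem.Int.floordiv (lo + hi) 2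
    if altDone cores mid ≥ nn then altSearch cores nn lo mid
    else altSearch cores nn (mid + 1) hi
  else lo
termination_by (hi - lo).toNat
decreasing_by
  · have h2 : PySem.Int.floordiv (lo + hi) 2 < hi :=
      (PySem.Int.floordiv_lt_iff_lt_mul (by omega)).mpr (by omega)
    omega
  · have h1 : lo ≤ PySem.Int.floordiv (lo + hi) 2 :=
      (PySem.Int.le_floordiv_iff_mul_le (by omega)).mpr (by omega)
    omega

-- final 'for i, c in enumerate(cores)' tie-break scan
def altPick (pairs : List (Int × Int)) (lo : Int) (r : Int) : Int :=
  match pairs with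
  | [] => 0
  | (i, c) :: rest =>
    if PySem.Int.mod lo |c| == 0 then
      if r - 1 == 0 then i + 1 else altPick rest lo (r - 1)
    else altPick rest lo r

def solution_alt (n : Int) (cores : List Int) : Int :=
  if 0 < n ∧ n ≤ (cores.length : Int) then n
  else
  let maxc := (PySem.List.max? (cores.map (fun c => |c|)) (fun x => x)).getD 0
  let lo := altSearch cores n 0 (n * maxc)
  altPick (PySem.List.enumerate cores 0) lo (n - altDone cores (lo - 1))

-- ===== PRECONDITION & SPEC =====
-- Pre_ excludes n ≤ 0 (A falls off the while loop and returns None, not an int), empty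
-- cores (A loops forever) and a zero core among the first min(n, len) cores — exactly the
-- positions A's time-0 pass evaluates — where A raises ZeroDivisionError on 0 % 0.
def Pre_solution (n : Int) (cores : List Int) : Prop :=
  1 ≤ n ∧ cores ≠ [] ∧ ∀ c ∈ cores.take n.toNat, c ≠ 0
instance (n : Int) (cores : List Int) : Decidable (Pre_solution n cores) := by
  unfold Pre_solution; infer_instance

def pvWitness_solution : Int × List Int := (5, [2, 3])

def Spec_solution (n : Int) (cores : List Int) (out : Int) : Prop := out = solution_alt n cores
instance (n : Int) (cores : List Int) (out : Int) : Decidable (Spec_solution n cores out) := by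
  unfold Spec_solution; infer_instance

-- ===== CLAIM (what is proved, stated in full; the proofs are below) =====
def Claim_equal_solution : Prop := ∀ (n : Int) (cores : List Int), Dom_solution n cores → Pre_solution n cores → Spec_solution n cores (solution n cores)

-- ===== LEMMAS AND PROOFS =====

-- number of cores firing at time t (c fires at t iff t % c == 0 iff c ∣ t)
def firesAt (cores : List Int) (t : Int) : Int :=
  ((cores.filter (fun c => decide (c ∣ t))).length : Int)

-- T is the first time by which n cumulative fire events have happened
def IsHit (n : Int) (cores : List Int) (T : Int) : Prop :=
  0 ≤ T ∧ n ≤ altDone cores T ∧ altDone cores (T - 1) < n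

theorem altDone_cons (c : Int) (cs : List Int) (t : Int) :
    altDone (c :: cs) t = PySem.Int.floordiv t |c| + 1 + altDone cs t := by
  simp [altDone]

theorem firesAt_nil (t : Int) : firesAt [] t = 0 := rfl

theorem firesAt_cons (c : Int) (cs : List Int) (t : Int) :
    firesAt (c :: cs) t = (if c ∣ t then 1 else 0) + firesAt cs t := by
  simp only [firesAt, List.filter_cons]
  by_cases h : c ∣ t
  · simp only [h, decide_true, if_true, List.length_cons]
    push_cast; ring
  · simp [h]

theorem firesAt_nonneg (cores : List Int) (t : Int) : 0 ≤ firesAt cores t :=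
  Int.natCast_nonneg _

-- one core's contribution to done(t) − done(t−1) is 1 exactly when it fires at t
theorem fd_step (t p : Int) (hp : 0 < p) :
    PySem.Int.floordiv t p = PySem.Int.floordiv (t - 1) p + (if p ∣ t then 1 else 0) := by
  have hmul := PySem.Int.floordiv_mul_add_mod (t - 1) p
  have hlo := PySem.Int.mod_nonneg (t - 1) hp
  have hhi := PySem.Int.mod_lt (t - 1) hp
  set q := PySem.Int.floordiv (t - 1) p with hq
  set r := PySem.Int.mod (t - 1) p with hr
  by_cases hcase : r = p - 1
  · have hdvd : p ∣ t := ⟨q + 1, by rw [mul_comm]; nlinarith⟩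
    have hfd : PySem.Int.floordiv t p = q + 1 :=
      (PySem.Int.floordiv_eq_iff_of_pos hp).mpr ⟨by nlinarith, by nlinarith⟩
    rw [if_pos hdvd, hfd]
  · have hr2 : r ≤ p - 2 := by omega
    have hnd : ¬ p ∣ t := by
      rintro ⟨k, hk⟩
      have h1 : p ∣ (r + 1) := ⟨k - q, by rw [mul_sub]; nlinarith⟩
      have := Int.le_of_dvd (by omega) h1
      omega
    have hfd : PySem.Int.floordiv t p = q :=
      (PySem.Int.floordiv_eq_iff_of_pos hp).mpr ⟨by nlinarith, by nlinarith [hr2]⟩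
    rw [if_neg hnd, hfd]
    ring

theorem altDone_mono (cores : List Int) (hc : ∀ c ∈ cores, c ≠ 0) {a b : Int} (hab : a ≤ b) :
    altDone cores a ≤ altDone cores b := by
  induction cores with
  | nil => simp [altDone]
  | cons c cs ih =>
    have hpos : (0 : Int) < |c| := abs_pos.mpr (hc c (by simp))
    have h1 : PySem.Int.floordiv a |c| ≤ PySem.Int.floordiv b |c| := by
      rw [PySem.Int.floordiv_eq_ediv_of_pos hpos, PySem.Int.floordiv_eq_ediv_of_pos hpos]
      exact Int.ediv_le_ediv hpos hab
    have h2 := ih (fun x hx => hc x (List.mem_cons_of_mem _ hx))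
    rw [altDone_cons, altDone_cons]; omega

theorem altDone_neg_one (cores : List Int) (hc : ∀ c ∈ cores, c ≠ 0) :
    altDone cores (-1) = 0 := by
  induction cores with
  | nil => simp [altDone]
  | cons c cs ih =>
    have hpos : (0 : Int) < |c| := abs_pos.mpr (hc c (by simp))
    have h1 : PySem.Int.floordiv (-1) |c| = -1 :=
      (PySem.Int.floordiv_eq_iff_of_pos hpos).mpr ⟨by omega, by omega⟩
    rw [altDone_cons, h1, ih (fun x hx => hc x (List.mem_cons_of_mem _ hx))]
    ring

-- step recurrence: done(t) = done(t-1) + fires(t)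
theorem altDone_rec (cores : List Int) (hc : ∀ c ∈ cores, c ≠ 0) (t : Int) :
    altDone cores t = altDone cores (t - 1) + firesAt cores t := by
  induction cores with
  | nil => simp [altDone, firesAt]
  | cons c cs ih =>
    have hpos : (0 : Int) < |c| := abs_pos.mpr (hc c (by simp))
    have h1 := fd_step t |c| hpos
    have h2 := ih (fun x hx => hc x (List.mem_cons_of_mem _ hx))
    rw [altDone_cons, altDone_cons, firesAt_cons, h1]
    have habs : (|c| ∣ t) ↔ (c ∣ t) := abs_dvd c t
    by_cases hd : c ∣ t
    · rw [if_pos (habs.mpr hd), if_pos hd]; omega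
    · rw [if_neg (fun h => hd (habs.mp h)), if_neg hd]; omega

-- a lower bound used both for A's fuel and B's initial hi
theorem altDone_lower (c : Int) (cs : List Int) (hc : c ≠ 0) (hcs : ∀ x ∈ cs, x ≠ 0)
    (k T : Int) (hk : 0 ≤ k) (hT : k * |c| ≤ T) : k ≤ altDone (c :: cs) T := by
  have hpos : (0 : Int) < |c| := abs_pos.mpr hc
  have hT0 : 0 ≤ T := le_trans (by positivity) hT
  have h1 : k ≤ PySem.Int.floordiv T |c| :=
    (PySem.Int.le_floordiv_iff_mul_le hpos).mpr hT
  have h2 : 0 ≤ altDone cs T := by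
    apply List.sum_nonneg
    intro x hx
    simp only [List.mem_map] at hx
    obtain ⟨y, hy, rfl⟩ := hx
    have hpy : (0 : Int) < |y| := abs_pos.mpr (hcs y hy)
    have : 0 ≤ PySem.Int.floordiv T |y| :=
      (PySem.Int.le_floordiv_iff_mul_le hpy).mpr (by omega)
    omega
  rw [altDone_cons]; omega

-- the hit time is unique
theorem isHit_unique (n : Int) (cores : List Int) (hc : ∀ c ∈ cores, c ≠ 0)
    {T T' : Int} (h : IsHit n cores T) (h' : IsHit n cores T') : T = T' := by
  obtain ⟨h0, h1, h2⟩ := h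
  obtain ⟨h0', h1', h2'⟩ := h'
  rcases lt_trichotomy T T' with hlt | heq | hgt
  · have := altDone_mono cores hc (show T ≤ T' - 1 by omega)
    omega
  · exact heq
  · have := altDone_mono cores hc (show T' ≤ T - 1 by omega)
    omega

-- A's inner pass agrees with B's tie-break scan when it returns …
theorem scan_agree (t : Int) : ∀ (rest : List Int) (i r : Int), 1 ≤ r →
    r ≤ firesAt rest t →
    (solutionScan t rest i r).1 = some (altPick (PySem.List.enumerate rest i) t r) := by
  intro rest
  induction rest with
  | nil => intro i r hr hfi; rw [firesAt_nil] at hfi; omega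
  | cons c cs ih =>
    intro i r hr hfi
    rw [firesAt_cons] at hfi
    have hfn := firesAt_nonneg cs t
    have hmodA : (PySem.Int.mod t c == 0) = decide (c ∣ t) := by
      by_cases h : c ∣ t <;> simp [h, PySem.Int.mod_eq_zero_iff_dvd]
    have hmodB : (PySem.Int.mod t |c| == 0) = decide (c ∣ t) := by
      by_cases h : c ∣ t <;> simp [h, PySem.Int.mod_eq_zero_iff_dvd, abs_dvd]
    rw [PySem.List.enumerate_cons]
    by_cases hd : c ∣ t
    · simp only [solutionScan, altPick, hmodA, hmodB, hd, decide_true, if_true]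
      by_cases hr1 : r = 1
      · subst hr1; norm_num
      · have : (r - 1 == 0) = false := by rw [beq_eq_false_iff_ne]; omega
        rw [this]
        simp only [Bool.false_eq_true, if_false]
        exact ih (i + 1) (r - 1) (by omega) (by rw [if_pos hd] at hfi; omega)
    · simp only [solutionScan, altPick, hmodA, hmodB, hd, decide_false, Bool.false_eq_true,
        if_false]
      exact ih (i + 1) r hr (by rw [if_neg hd] at hfi; omega)

-- … and otherwise decrements n by the number of fires
theorem scan_none (t : Int) : ∀ (rest : List Int) (i r : Int), firesAt rest t < r →
    solutionScan t rest i r = (none, r - firesAt rest t) := by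
  intro rest
  induction rest with
  | nil => intro i r hfi; rw [firesAt_nil]; simp [solutionScan]
  | cons c cs ih =>
    intro i r hfi
    rw [firesAt_cons] at hfi ⊢
    have hfn := firesAt_nonneg cs t
    have hmodA : (PySem.Int.mod t c == 0) = decide (c ∣ t) := by
      by_cases h : c ∣ t <;> simp [h, PySem.Int.mod_eq_zero_iff_dvd]
    by_cases hd : c ∣ t
    · rw [if_pos hd] at hfi ⊢
      have : (r - 1 == 0) = false := by rw [beq_eq_false_iff_ne]; omega
      simp only [solutionScan, hmodA, hd, decide_true, if_true, this,
        Bool.false_eq_true, if_false]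
      rw [ih (i + 1) (r - 1) (by omega)]
      congr 1; ring
    · rw [if_neg hd] at hfi ⊢
      simp only [solutionScan, hmodA, hd, decide_false, Bool.false_eq_true, if_false]
      rw [ih (i + 1) r (by omega)]
      congr 1; ring

-- the outer while loop lands exactly at the hit time and runs B's tie-break scan there
theorem loop_correct (n : Int) (cores : List Int) (hc : ∀ c ∈ cores, c ≠ 0)
    (T : Int) (hT : IsHit n cores T) :
    ∀ (fuel : Nat) (t : Int), 0 ≤ t → 1 ≤ n - altDone cores (t - 1) →
    (T - t).toNat < fuel →
    solutionLoop cores fuel t (n - altDone cores (t - 1)) =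
      altPick (PySem.List.enumerate cores 0) T (n - altDone cores (T - 1)) := by
  intro fuel
  induction fuel with
  | zero => intro t _ _ hf; omega
  | succ f ih =>
    intro t ht hrem hf
    have hrec := altDone_rec cores hc t
    rw [solutionLoop, if_pos (by omega : n - altDone cores (t - 1) > 0)]
    by_cases hge : n ≤ altDone cores t
    · -- the loop returns at this time step, which must be T
      have hTt : T = t := isHit_unique n cores hc hT ⟨ht, hge, by omega⟩
      have hsc := scan_agree t cores 0 (n - altDone cores (t - 1)) (by omega) (by omega)
      rcases hval : solutionScan t cores 0 (n - altDone cores (t - 1)) with ⟨o, n'⟩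
      rw [hval] at hsc
      simp only at hsc
      rw [hsc, hTt]
    · -- nobody left to fire: one more time step
      have hsc := scan_none t cores 0 (n - altDone cores (t - 1)) (by omega)
      rw [hsc]
      have harg : n - altDone cores (t - 1) - firesAt cores t = n - altDone cores (t + 1 - 1) := by
        simp only [add_sub_cancel_right]; omega
      have htT : t < T := by
        by_contra hcon
        have := altDone_mono cores hc (show T ≤ t by omega)
        have := hT.2.1
        omega
      rw [harg]
      exact ih (t + 1) (by omega) (by omega) (by omega)

-- the binary search returns the hit time
theorem search_correct (n : Int) (cores : List Int) (hc : ∀ c ∈ cores, c ≠ 0) (hn : 1 ≤ n) :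
    ∀ (k : Nat) (lo hi : Int), (hi - lo).toNat = k → 0 ≤ lo → lo ≤ hi →
    (lo = 0 ∨ altDone cores (lo - 1) < n) →
    n ≤ altDone cores hi → IsHit n cores (altSearch cores n lo hi) := by
  intro k
  induction k using Nat.strong_induction_on with
  | _ k ih =>
    intro lo hi hk h0 hlh hlcond hhcond
    rw [altSearch]
    by_cases hlt : lo < hi
    · rw [dif_pos hlt]
      have hm1 : lo ≤ PySem.Int.floordiv (lo + hi) 2 :=
        (PySem.Int.le_floordiv_iff_mul_le (by omega)).mpr (by omega)
      have hm2 : PySem.Int.floordiv (lo + hi) 2 < hi :=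
        (PySem.Int.floordiv_lt_iff_lt_mul (by omega)).mpr (by omega)
      set mid := PySem.Int.floordiv (lo + hi) 2 with hmid
      by_cases hgd : altDone cores mid ≥ n
      · rw [if_pos hgd]
        exact ih (mid - lo).toNat (by omega) lo mid rfl h0 hm1 hlcond hgd
      · rw [if_neg hgd]
        exact ih (hi - (mid + 1)).toNat (by omega) (mid + 1) hi rfl (by omega) (by omega)
          (Or.inr (by simpa using (by omega : altDone cores mid < n))) hhcond
    · rw [dif_neg hlt]
      have hle : lo = hi := le_antisymm hlh (by omega)
      subst hle
      refine ⟨h0, hhcond, ?_⟩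
      rcases hlcond with h | h
      · subst h
        have h1 : (0 : Int) - 1 = -1 := by ring
        rw [h1, altDone_neg_one cores hc]
        omega
      · exact h

-- at time 0 every core fires, so A's first pass returns the r-th core while r ≤ len
theorem scan_zero : ∀ (rest : List Int) (i r : Int), 1 ≤ r → r ≤ (rest.length : Int) →
    (solutionScan 0 rest i r).1 = some (i + r) := by
  intro rest
  induction rest with
  | nil => intro i r h1 h2; simp at h2; omega
  | cons c cs ih =>
    intro i r h1 h2
    have hmod : (PySem.Int.mod 0 c == 0) = true := by
      simp [PySem.Int.mod_eq_zero_iff_dvd]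
    simp only [solutionScan, hmod, if_true]
    by_cases hr1 : r = 1
    · subst hr1; norm_num
    · have hne : (r - 1 == 0) = false := by rw [beq_eq_false_iff_ne]; omega
      rw [hne]
      simp only [Bool.false_eq_true, if_false]
      have := ih (i + 1) (r - 1) (by omega)
        (by rw [List.length_cons] at h2; push_cast at h2; omega)
      rw [this]
      congr 1
      ring

-- ===== VERDICT (by name: the statement is the Claim_ definition above) =====
theorem solution_spec : Claim_equal_solution := by
  intro n cores _ hpre
  obtain ⟨hn, hne, hcall⟩ := hpre
  obtain ⟨c0, cs, rfl⟩ : ∃ c0 cs, cores = c0 :: cs := by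
    cases cores with
    | nil => exact absurd rfl hne
    | cons a b => exact ⟨a, b, rfl⟩
  set cores := c0 :: cs with hcores
  show solution n cores = solution_alt n cores
  by_cases hnm : n ≤ (cores.length : Int)
  · -- the time-0 shortcut: both sides give n
    have hsc := scan_zero cores 0 n hn hnm
    rcases hval : solutionScan 0 cores 0 n with ⟨o, n'⟩
    rw [hval] at hsc
    simp only at hsc
    have hfuel : solutionFuel n cores =
        (n.toNat * cores.foldl (fun acc c => max acc c.natAbs) 1) + 1 := rfl
    rw [solution, hfuel, solutionLoop, if_pos (by omega : n > 0), hval, hsc,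
      solution_alt, if_pos ⟨by omega, hnm⟩]
    ring
  · -- the binary-search branch: here Pre_ makes every core nonzero
    have hlen : cores.length ≤ n.toNat := by omega
    have hc : ∀ c ∈ cores, c ≠ 0 := fun c hcm =>
      hcall c (by rw [List.take_of_length_le hlen]; exact hcm)
    have hc0 : c0 ≠ 0 := hc c0 (by rw [hcores]; simp)
    have hcs : ∀ x ∈ cs, x ≠ 0 := fun x hx => hc x (List.mem_cons_of_mem _ hx)
    have hneg1 := altDone_neg_one cores hc
    -- B's max |c| bounds every period
    rcases hmax : PySem.List.max? (cores.map (fun c => |c|)) (fun x => x) with _ | m0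
    · rw [PySem.List.max?_eq_none_iff] at hmax
      simp [hcores] at hmax
    have hisMax := PySem.List.max?_isMax hmax
    have hc0le : |c0| ≤ m0 := hisMax |c0| (by rw [hcores]; simp)
    have hm0pos : (0 : Int) < m0 := lt_of_lt_of_le (abs_pos.mpr hc0) hc0le
    have hhi : n ≤ altDone cores (n * m0) :=
      altDone_lower c0 cs hc0 hcs n (n * m0) (by omega)
        (by nlinarith [abs_nonneg c0])
    have hhit : IsHit n cores (altSearch cores n 0 (n * m0)) :=
      search_correct n cores hc hn (n * m0 - 0).toNat 0 (n * m0) rfl (le_refl 0)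
        (by nlinarith) (Or.inl rfl) hhi
    set lo := altSearch cores n 0 (n * m0) with hlo
    -- A's fuel bound: lo ≤ n * M where M is A's running max of |c|
    set M := cores.foldl (fun acc c => max acc c.natAbs) 1 with hM
    have hMle : c0.natAbs ≤ M :=
      (PySem.List.le_foldl_max_nat cores (fun c => c.natAbs) 1).2 c0 (by rw [hcores]; simp)
    have hMabs : |c0| ≤ (M : Int) := by
      rw [Int.abs_eq_natAbs]; exact_mod_cast hMle
    have hfuelBound : n ≤ altDone cores (n * (M : Int)) :=
      altDone_lower c0 cs hc0 hcs n (n * (M : Int)) (by omega)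
        (by nlinarith [abs_nonneg c0])
    have hloBound : lo ≤ n * (M : Int) := by
      by_contra hcon
      have h1 : n * (M : Int) ≤ lo - 1 := by omega
      have := altDone_mono cores hc h1
      have := hhit.2.2
      omega
    have hcastM : ((n.toNat * M : Nat) : Int) = n * (M : Int) := by
      push_cast
      rw [Int.toNat_of_nonneg (by omega)]
    have hlo0 : 0 ≤ lo := hhit.1
    have hMdef : solutionFuel n cores = n.toNat * M + 1 := rfl
    have hfuel : (lo - 0).toNat < solutionFuel n cores := by
      rw [hMdef]
      omega
    have hstart : n - altDone cores (0 - 1) = n := by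
      rw [show (0 : Int) - 1 = -1 by ring, hneg1]; ring
    have hA := loop_correct n cores hc lo hhit (solutionFuel n cores) 0 (le_refl 0)
      (by rw [show (0 : Int) - 1 = -1 by ring, hneg1]; omega) hfuel
    rw [hstart] at hA
    rw [solution, hA, solution_alt, if_neg (fun h => hnm h.2)]
    simp only [hmax, Option.getD_some, ← hlo]
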